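-- pv_equiv track=rewrite | github.com/davelorino/sc | src/ri/model/structures.py | parse_group_key
-- ===== SOURCE A (Python) =====
-- from typing import Tuple, Dict, Optional
--
-- def parse_group_key(group: str) -> Dict[str, Optional[str]]:
--     out = {"level": None, "product_id": None, "brand": None, "category": None, "subcategory": None}
--     parts = group.split("|")
--     for p in parts:
--         if "=" not in p: continue
--         k, v = p.split("=", 1)
--         if k == "sku":
--             out["level"] = "sku"; out["product_id"] = v
--         elif k == "brand":
--             out["brand"] = v; out["level"] = out["level"] or "brand"
--         elif k == "cat":
--             out["category"] = v; out["level"] = out["level"] or "category"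
--         elif k == "subcat":
--             out["subcategory"] = v; out["level"] = out["level"] or "subcategory"
--     if out["brand"] and out["category"]:
--         out["level"] = "brand_category"
--     if out["brand"] and out["subcategory"] and not out["category"]:
--         out["level"] = "brand_subcategory"
--     return out
-- ===== SOURCE B (Python) =====
-- def parse_group_key(group: str):
--     # Phase 1: ordered dict of all key=value pairs, last value wins per key.
--     d = {}
--     for p in group.split("|"):
--         if "=" in p:
--             k, v = p.split("=", 1)
--             d[k] = v
--     # Phase 2: base level -- sku wins; else first-inserted of brand/cat/subcat.
--     names = {"brand": "brand", "cat": "category", "subcat": "subcategory"}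
--     level = None
--     if "sku" in d:
--         level = "sku"
--     else:
--         for k in d:
--             if k in names:
--                 level = names[k]
--                 break
--     brand, cat, sub = d.get("brand"), d.get("cat"), d.get("subcat")
--     if brand and cat:
--         level = "brand_category"
--     elif brand and sub:
--         level = "brand_subcategory"
--     return {"level": level, "product_id": d.get("sku"),
--             "brand": brand, "category": cat, "subcategory": sub}
-- ===== Notes on version B (the rewrite author's own statement) =====
-- stated objective: alternative
-- what changed: A's single interleaved loop (per-key dispatch with running level bookkeeping and 'or' defaults) is replaced by two phases: one generic pass building an ordered last-wins dict of all key=value pairs, then all output fields and the level are derived from the dict (sku membership, else the first-inserted key among brand/cat/subcat via the dict's insertion order) with the two override rules applied at the end.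
import Mathlib
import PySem

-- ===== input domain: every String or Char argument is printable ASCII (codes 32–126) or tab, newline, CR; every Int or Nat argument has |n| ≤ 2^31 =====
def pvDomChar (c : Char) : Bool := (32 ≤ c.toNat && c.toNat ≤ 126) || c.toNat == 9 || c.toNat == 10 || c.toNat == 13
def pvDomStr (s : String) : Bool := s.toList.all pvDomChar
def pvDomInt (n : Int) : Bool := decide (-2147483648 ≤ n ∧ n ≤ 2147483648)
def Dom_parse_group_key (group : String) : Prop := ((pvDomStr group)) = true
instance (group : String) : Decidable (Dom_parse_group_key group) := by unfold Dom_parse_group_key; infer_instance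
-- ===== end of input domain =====

-- B replaces A's single interleaved parse loop (fixed-key dispatch with level bookkeeping)
-- by two phases: a generic key=value dict build, then derivation of all fields from the dict.
-- Objective: alternative decomposition, same cost.

-- ===== PORT A =====
-- Python truthiness of an Optional[str]
def pvTruthy (o : Option String) : Bool :=
  match o with
  | none => false
  | some s => !(s == "")

-- 'x or y' on Optional[str]
def pvOr (a b : Option String) : Option String := if pvTruthy a then a else b

-- A's dict 'out' has five fixed keys; ported as a record, returned in insertion order.
structure POut where
  level : Option String
  product_id : Option String
  brand : Option String
  category : Option String
  subcategory : Option String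
deriving Repr, DecidableEq

-- one iteration of A's 'for p in parts' loop
def pvStepA (o : POut) (p : String) : POut :=
  if !(PySem.Str.isIn "=" p) then o
  else
    let kv := (PySem.Str.splitMax? p "=" 1).getD []   -- p.split("=", 1); some since "=" ≠ ""
    let k := kv.getD 0 ""
    let v := kv.getD 1 ""
    if k == "sku" then { o with level := some "sku", product_id := some v }
    else if k == "brand" then { o with brand := some v, level := pvOr o.level (some "brand") }
    else if k == "cat" then { o with category := some v, level := pvOr o.level (some "category") }
    else if k == "subcat" then { o with subcategory := some v, level := pvOr o.level (some "subcategory") }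
    else o

def parse_group_key (group : String) : List (String × Option String) :=
  let out : POut := ⟨none, none, none, none, none⟩
  let parts := (PySem.Str.split? group "|").getD []   -- group.split("|"); some since "|" ≠ ""
  let out := parts.foldl pvStepA out
  let out := if pvTruthy out.brand && pvTruthy out.category then
               { out with level := some "brand_category" } else out
  let out := if pvTruthy out.brand && pvTruthy out.subcategory && !(pvTruthy out.category) then
               { out with level := some "brand_subcategory" } else out
  [("level", out.level), ("product_id", out.product_id), ("brand", out.brand),
   ("category", out.category), ("subcategory", out.subcategory)]

-- ===== PORT B =====
-- B's 'names' dict literal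
def pvNames : PySem.Dict String String :=
  PySem.Dict.ofList [("brand", "brand"), ("cat", "category"), ("subcat", "subcategory")]

-- B's 'for k in d: if k in names: level = names[k]; break' over the dict's keys
def pvFirstLevel : List String → Option String
  | [] => none
  | k :: rest =>
    match pvNames.get? k with
    | some n => some n
    | none => pvFirstLevel rest

-- one iteration of B's dict-building loop
def pvStepB (d : PySem.Dict String String) (p : String) : PySem.Dict String String :=
  if PySem.Str.isIn "=" p then
    let kv := (PySem.Str.splitMax? p "=" 1).getD []
    d.insert (kv.getD 0 "") (kv.getD 1 "")
  else d

def parse_group_key_alt (group : String) : List (String × Option String) :=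
  let d := ((PySem.Str.split? group "|").getD []).foldl pvStepB PySem.Dict.empty
  let level0 := if d.contains "sku" then some "sku" else pvFirstLevel d.keys
  let brand := d.get? "brand"
  let cat := d.get? "cat"
  let sub := d.get? "subcat"
  let level := if pvTruthy brand && pvTruthy cat then some "brand_category"
               else if pvTruthy brand && pvTruthy sub then some "brand_subcategory"
               else level0
  [("level", level), ("product_id", d.get? "sku"), ("brand", brand),
   ("category", cat), ("subcategory", sub)]

-- ===== PRECONDITION & SPEC =====
def Spec_parse_group_key (group : String) (out : List (String × Option String)) : Prop := out = parse_group_key_alt group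
instance (group : String) (out : List (String × Option String)) : Decidable (Spec_parse_group_key group out) := by unfold Spec_parse_group_key; infer_instance

-- ===== CLAIM (what is proved, stated in full; the proofs are below) =====
def Claim_equal_parse_group_key : Prop := ∀ (group : String), Dom_parse_group_key group → Spec_parse_group_key group (parse_group_key group)

-- ===== LEMMAS AND PROOFS =====

-- the loop invariant relating A's record to B's dict
def pvInv (o : POut) (d : PySem.Dict String String) : Prop :=
  o.product_id = d.get? "sku" ∧ o.brand = d.get? "brand" ∧
  o.category = d.get? "cat" ∧ o.subcategory = d.get? "subcat" ∧
  o.level = (if d.contains "sku" then some "sku" else pvFirstLevel d.keys)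

lemma pvNames_get (x : String) : pvNames.get? x =
    if x = "brand" then some "brand" else if x = "cat" then some "category"
    else if x = "subcat" then some "subcategory" else none := by
  show (PySem.Dict.mk [("brand","brand"),("cat","category"),("subcat","subcategory")]).get? x = _
  rw [PySem.Dict.get?_mk_cons, PySem.Dict.get?_mk_cons, PySem.Dict.get?_mk_cons]
  simp only [beq_iff_eq, eq_comm (b := x)]
  split_ifs <;> simp [PySem.Dict.get?]

lemma pvFirstLevel_append (ks : List String) (k : String) :
    pvFirstLevel (ks ++ [k]) =
      match pvFirstLevel ks with
      | some n => some n
      | none => pvNames.get? k := by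
  induction ks with
  | nil => simp only [List.nil_append, pvFirstLevel]; cases pvNames.get? k <;> rfl
  | cons a t ih =>
    simp only [List.cons_append, pvFirstLevel]
    cases pvNames.get? a <;> simp [ih]

lemma pvFirstLevel_mem (ks : List String) (n : String) (h : pvFirstLevel ks = some n) :
    n = "brand" ∨ n = "category" ∨ n = "subcategory" := by
  induction ks with
  | nil => simp [pvFirstLevel] at h
  | cons a t ih =>
    rw [pvFirstLevel] at h
    rcases hg : pvNames.get? a with _ | m
    · rw [hg] at h; exact ih h
    · rw [hg] at h
      rw [pvNames_get] at hg
      split_ifs at hg <;> simp_all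

lemma pvFirstLevel_isSome_of_mem (ks : List String) (k : String)
    (hk : k ∈ ks) (hn : (pvNames.get? k).isSome) : (pvFirstLevel ks).isSome := by
  induction ks with
  | nil => simp at hk
  | cons a t ih =>
    rw [pvFirstLevel]
    rcases hg : pvNames.get? a with _ | m
    · rcases List.mem_cons.1 hk with rfl | hm
      · rw [hg] at hn; simp at hn
      · exact ih hm
    · simp

lemma pvTruthy_firstLevel (ks : List String) (n : String) (h : pvFirstLevel ks = some n) :
    pvTruthy (some n) = true := by
  rcases pvFirstLevel_mem ks n h with rfl | rfl | rfl <;> decide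

-- inserting a key named in pvNames: B's level expression absorbs A's 'level or name'
lemma pvLevel_insert_named (d : PySem.Dict String String) (v k name : String)
    (hk : pvNames.get? k = some name) (hs : k ≠ "sku") :
    (if (d.insert k v).contains "sku" then some "sku" else pvFirstLevel (d.insert k v).keys)
      = pvOr (if d.contains "sku" then some "sku" else pvFirstLevel d.keys) (some name) := by
  have hc : (d.insert k v).contains "sku" = d.contains "sku" := by
    rw [PySem.Dict.contains_insert]
    simp [Ne.symm hs]
  rw [hc]
  by_cases hsku : d.contains "sku" = true
  · simp [hsku, pvOr, pvTruthy]
  · simp only [Bool.not_eq_true] at hsku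
    simp only [hsku, Bool.false_eq_true, if_false]
    by_cases hck : d.contains k = true
    · rw [PySem.Dict.keys_insert_of_contains _ _ hck]
      have hmem : k ∈ d.keys := (PySem.Dict.contains_iff_mem_keys _ _).1 hck
      have hsome := pvFirstLevel_isSome_of_mem d.keys k hmem (by rw [hk]; rfl)
      obtain ⟨n, hn⟩ := Option.isSome_iff_exists.1 hsome
      rw [hn, pvOr, pvTruthy_firstLevel _ _ hn]
      rfl
    · simp only [Bool.not_eq_true] at hck
      rw [PySem.Dict.keys_insert_of_not_contains _ _ hck, pvFirstLevel_append]
      cases hfl : pvFirstLevel d.keys with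
      | none => simp [pvOr, pvTruthy, hk]
      | some n => rw [pvOr, pvTruthy_firstLevel _ _ hfl]; rfl

lemma pvStep_inv (o : POut) (d : PySem.Dict String String) (p : String)
    (h : pvInv o d) : pvInv (pvStepA o p) (pvStepB d p) := by
  obtain ⟨h1, h2, h3, h4, h5⟩ := h
  rw [pvStepA, pvStepB]
  cases hin : PySem.Str.isIn "=" p
  · simpa using ⟨h1, h2, h3, h4, h5⟩
  · simp only [Bool.not_true, Bool.false_eq_true, if_false, if_true]
    generalize ((PySem.Str.splitMax? p "=" 1).getD []).getD 0 "" = k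
    generalize ((PySem.Str.splitMax? p "=" 1).getD []).getD 1 "" = v
    by_cases hsku : k = "sku"
    · subst hsku
      refine ⟨?_, ?_, ?_, ?_, ?_⟩ <;>
        simp [PySem.Dict.get?_insert_self, h2, h3, h4,
          PySem.Dict.get?_insert_of_ne _ _ (by decide : "brand" ≠ "sku"),
          PySem.Dict.get?_insert_of_ne _ _ (by decide : "cat" ≠ "sku"),
          PySem.Dict.get?_insert_of_ne _ _ (by decide : "subcat" ≠ "sku")]
    · have hbs : (k == "sku") = false := by simp [hsku]
      rw [if_neg (by simp [hsku])]
      by_cases hbrand : k = "brand"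
      · subst hbrand
        simp only [beq_self_eq_true, if_true]
        refine ⟨?_, ?_, ?_, ?_, ?_⟩
        · rw [h1, PySem.Dict.get?_insert_of_ne _ _ (by decide : "sku" ≠ "brand")]
        · rw [PySem.Dict.get?_insert_self]
        · rw [h3, PySem.Dict.get?_insert_of_ne _ _ (by decide : "cat" ≠ "brand")]
        · rw [h4, PySem.Dict.get?_insert_of_ne _ _ (by decide : "subcat" ≠ "brand")]
        · rw [h5, pvLevel_insert_named d v "brand" "brand" (by decide) (by decide)]
      · rw [if_neg (by simp [hbrand])]
        by_cases hcat : k = "cat"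
        · subst hcat
          simp only [beq_self_eq_true, if_true]
          refine ⟨?_, ?_, ?_, ?_, ?_⟩
          · rw [h1, PySem.Dict.get?_insert_of_ne _ _ (by decide : "sku" ≠ "cat")]
          · rw [h2, PySem.Dict.get?_insert_of_ne _ _ (by decide : "brand" ≠ "cat")]
          · rw [PySem.Dict.get?_insert_self]
          · rw [h4, PySem.Dict.get?_insert_of_ne _ _ (by decide : "subcat" ≠ "cat")]
          · rw [h5, pvLevel_insert_named d v "cat" "category" (by decide) (by decide)]
        · rw [if_neg (by simp [hcat])]
          by_cases hsub : k = "subcat"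
          · subst hsub
            simp only [beq_self_eq_true, if_true]
            refine ⟨?_, ?_, ?_, ?_, ?_⟩
            · rw [h1, PySem.Dict.get?_insert_of_ne _ _ (by decide : "sku" ≠ "subcat")]
            · rw [h2, PySem.Dict.get?_insert_of_ne _ _ (by decide : "brand" ≠ "subcat")]
            · rw [h3, PySem.Dict.get?_insert_of_ne _ _ (by decide : "cat" ≠ "subcat")]
            · rw [PySem.Dict.get?_insert_self]
            · rw [h5, pvLevel_insert_named d v "subcat" "subcategory" (by decide) (by decide)]
          · rw [if_neg (by simp [hsub])]
            have hn : pvNames.get? k = none := by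
              rw [pvNames_get]; simp [hbrand, hcat, hsub]
            refine ⟨?_, ?_, ?_, ?_, ?_⟩
            · rw [h1, PySem.Dict.get?_insert_of_ne _ _ (Ne.symm hsku)]
            · rw [h2, PySem.Dict.get?_insert_of_ne _ _ (Ne.symm hbrand)]
            · rw [h3, PySem.Dict.get?_insert_of_ne _ _ (Ne.symm hcat)]
            · rw [h4, PySem.Dict.get?_insert_of_ne _ _ (Ne.symm hsub)]
            · rw [h5]
              have hc : (d.insert k v).contains "sku" = d.contains "sku" := by
                rw [PySem.Dict.contains_insert]; simp [Ne.symm hsku]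
              rw [hc]
              by_cases hskuc : d.contains "sku" = true
              · simp [hskuc]
              · simp only [Bool.not_eq_true] at hskuc
                simp only [hskuc, Bool.false_eq_true, if_false]
                by_cases hck : d.contains k = true
                · rw [PySem.Dict.keys_insert_of_contains _ _ hck]
                · simp only [Bool.not_eq_true] at hck
                  rw [PySem.Dict.keys_insert_of_not_contains _ _ hck, pvFirstLevel_append, hn]
                  cases pvFirstLevel d.keys <;> rfl

lemma pvLoop_inv (ps : List String) (o : POut) (d : PySem.Dict String String)
    (h : pvInv o d) : pvInv (ps.foldl pvStepA o) (ps.foldl pvStepB d) := by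
  induction ps generalizing o d with
  | nil => exact h
  | cons p ps ih => exact ih _ _ (pvStep_inv o d p h)

-- ===== VERDICT (by name: the statement is the Claim_ definition above) =====
theorem parse_group_key_spec : Claim_equal_parse_group_key := by
  intro group _
  show parse_group_key group = parse_group_key_alt group
  obtain ⟨h1, h2, h3, h4, h5⟩ :=
    pvLoop_inv ((PySem.Str.split? group "|").getD []) ⟨none, none, none, none, none⟩
      PySem.Dict.empty (by refine ⟨?_, ?_, ?_, ?_, ?_⟩ <;> rfl)
  simp only [parse_group_key, parse_group_key_alt]
  set o := ((PySem.Str.split? group "|").getD []).foldl pvStepA ⟨none, none, none, none, none⟩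
  set d := ((PySem.Str.split? group "|").getD []).foldl pvStepB PySem.Dict.empty
  rw [← h1, ← h2, ← h3, ← h4, ← h5]
  by_cases hb : pvTruthy o.brand = true <;> by_cases hc : pvTruthy o.category = true <;>
    by_cases hs : pvTruthy o.subcategory = true <;>
      simp_all
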